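-- pv_equiv track=rewrite | github.com/jymoon0613/codingtest | book/01.그리디/09.그리디_기출문제06.py | solution
-- ===== SOURCE A (Python) =====
-- def solution(food_times, k):
--
--     cnt = 0
--     head = 0
--     zero_count = 0
--
--     while True:
--
--         head %= len(food_times)
--
--         if food_times[head] == 0:
--             zero_count += 1
--             head += 1
--
--             if zero_count == len(food_times):
--                 break
--
--             continue
--
--         food_times[head] -= 1
--         head += 1
--         cnt += 1
--         zero_count = 0
--
--         if cnt == k or zero_count == len(food_times):
--             break
--
--     if zero_count == len(food_times):
--         return -1
--     else:
--         return head % len(food_times) + 1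
-- ===== SOURCE B (Python) =====
-- def solution(food_times, k):
--     # Jump over whole rounds at once instead of simulating second by second
--     # (does not mutate food_times; only the return value matters here).
--     n = len(food_times)
--     remaining = list(food_times)
--     need = k
--     while True:
--         m = sum(1 for t in remaining if t != 0)
--         if m == 0:
--             return -1
--         if need <= m:
--             for i, t in enumerate(remaining):
--                 if t != 0:
--                     need -= 1
--                     if need == 0:
--                         return (i + 1) % n + 1
--         rounds = (need - 1) // m
--         for t in remaining:
--             if 0 < t < rounds:
--                 rounds = t
--         remaining = [t - rounds if t != 0 else t for t in remaining]
--         need -= rounds * m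
-- ===== Notes on version B (the rewrite author's own statement) =====
-- stated objective: alternative
-- what changed: A simulates eating second by second, moving a head pointer one food at a time over the (mutated) list; B never walks second by second: it counts the uneaten foods, jumps over whole rounds at once (as many as fit below the smallest positive remaining time), and scans food by food only inside the final round; Pre_ restricts to the problem's natural domain (nonempty list, k >= 1): A raises ZeroDivisionError on [], and for k < 1 its -1 / non-termination is an accident of checking cnt == k only after the increment (A mutates food_times in place, B does not; the claim is about the return value).
-- outside the precondition, e.g. on solution([2, 1], 0): A returns -1, B returns 1
import Mathlib
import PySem

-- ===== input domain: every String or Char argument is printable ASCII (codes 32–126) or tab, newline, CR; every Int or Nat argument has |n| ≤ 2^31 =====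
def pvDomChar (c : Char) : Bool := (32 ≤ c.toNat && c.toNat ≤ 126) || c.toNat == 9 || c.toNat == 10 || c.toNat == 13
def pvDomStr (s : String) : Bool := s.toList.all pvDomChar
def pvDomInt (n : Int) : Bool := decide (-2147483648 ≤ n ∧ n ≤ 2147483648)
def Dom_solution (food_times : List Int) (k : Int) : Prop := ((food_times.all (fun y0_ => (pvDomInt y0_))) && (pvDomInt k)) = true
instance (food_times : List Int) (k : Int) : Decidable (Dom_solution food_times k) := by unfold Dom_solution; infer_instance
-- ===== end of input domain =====

-- B batches whole rounds at once instead of simulating the eating second by second; the equivalence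
-- is about the RETURN value only: Python A mutates food_times in place, B does not.

-- ===== PORT A =====
-- Σ max(t,0), used only to size the fuel of A's loop (A's while-loop terminates on every input
-- admitted by Pre_solution; the proofs below show this fuel is never exhausted there).
def pvSumPos (l : List Int) : Nat := (l.map Int.toNat).sum

def fuelA (food_times : List Int) (k : Int) : Nat :=
  (k.toNat + pvSumPos food_times + 2) * (food_times.length + 2)

-- the body of A's `while True`; state = (list, head, cnt, zero_count) exactly as in the Python
def loopA (k : Int) (lst : List Int) (head cnt zc : Nat) : Nat → Int
  | 0 => -1   -- fuel exhaustion: never reached on inputs satisfying Pre_solution (see the proofs)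
  | fuel + 1 =>
    if lst.length = 0 then -1   -- Python raises ZeroDivisionError at `head %= len(food_times)`; excluded by Pre_solution
    else if lst.getD (head % lst.length) 0 = 0 then
      if zc + 1 = lst.length then -1                    -- break; zero_count == len → return -1
      else loopA k lst (head % lst.length + 1) cnt (zc + 1) fuel
    else if (cnt : Int) + 1 = k ∨ lst.length = 0 then   -- `if cnt == k or zero_count == len` (zero_count just reset to 0)
      (((head % lst.length + 1) % lst.length + 1 : Nat) : Int)  -- break with zero_count = 0 ≠ len → head % len + 1
    else loopA k (lst.set (head % lst.length) (lst.getD (head % lst.length) 0 - 1))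
      (head % lst.length + 1) (cnt + 1) 0 fuel

def solution (food_times : List Int) (k : Int) : Int :=
  loopA k food_times 0 0 0 (fuelA food_times k)

-- ===== PORT B =====
-- Source B's inner `for i, t in enumerate(remaining)` scan that finds the need-th uneaten food
def pickB (n : Nat) : List Int → Nat → Int → Int
  | [], _, _ => -2   -- the Python for-loop falls through only when need < 1; unreachable under Pre_solution
  | t :: rest, i, need =>
    if t ≠ 0 then
      if need - 1 = 0 then (((i + 1) % n + 1 : Nat) : Int)
      else pickB n rest (i + 1) (need - 1)
    else pickB n rest (i + 1) need

-- Source B's `while True`; state = (remaining, need) exactly as in the Python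
def loopB (n : Nat) : List Int → Int → Nat → Int
  | _, _, 0 => -2     -- fuel exhaustion: never reached under Pre_solution (proved below)
  | remaining, need, fuel + 1 =>
    let m := remaining.countP (fun t => decide (t ≠ 0))
    if m = 0 then -1
    else if need ≤ (m : Int) then pickB n remaining 0 need
    else
      let cap := PySem.Int.floordiv (need - 1) (m : Int)
      let rounds := remaining.foldl (fun r t => if 0 < t ∧ t < r then t else r) cap
      loopB n (remaining.map (fun t => if t ≠ 0 then t - rounds else t))
        (need - rounds * (m : Int)) fuel

def solution_alt (food_times : List Int) (k : Int) : Int :=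
  loopB food_times.length food_times k (food_times.length + 2)

-- ===== PRECONDITION & SPEC =====
-- Pre_ restricts to the problem's natural domain: a nonempty list and k ≥ 1. On [] A raises
-- ZeroDivisionError; for k < 1 A never matches `cnt == k` (checked only after incrementing), so it
-- either diverges (a negative entry) or returns -1 as an accident of that post-increment check.
def Pre_solution (food_times : List Int) (k : Int) : Prop :=
  food_times ≠ [] ∧ 1 ≤ k
instance (food_times : List Int) (k : Int) : Decidable (Pre_solution food_times k) := by
  unfold Pre_solution; infer_instance

def pvWitness_solution : List Int × Int := ([3, 1, 2], 5)

def Spec_solution (food_times : List Int) (k : Int) (out : Int) : Prop := out = solution_alt food_times k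
instance (food_times : List Int) (k : Int) (out : Int) : Decidable (Spec_solution food_times k out) := by
  unfold Spec_solution; infer_instance

-- ===== CLAIM (what is proved, stated in full; the proofs are below) =====
def Claim_equal_solution : Prop := ∀ (food_times : List Int) (k : Int), Dom_solution food_times k → Pre_solution food_times k → Spec_solution food_times k (solution food_times k)

-- ===== LEMMAS AND PROOFS =====

-- ---- the common model: position s = the s-th visit of A's head (0-based); it is index s % n in round s / n + 1 ----

-- is the food visited at position s still eaten there?
def actB (ft : List Int) (s : Nat) : Bool :=
  decide (ft.getD (s % ft.length) 0 < 0) || decide (((s / ft.length : Nat) : Int) < ft.getD (s % ft.length) 0)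

-- number of eats among positions < s  (A's cnt when the head is about to process position s)
def cntA (ft : List Int) (s : Nat) : Nat := (List.range s).countP (actB ft)

-- number of visits the head pays to index i among positions < s
def visN (n s i : Nat) : Nat := (s + n - 1 - i) / n

-- remaining time of a food that started at t after q visits
def curV (t : Int) (q : Nat) : Int := if t < 0 then t - (q : Int) else if t ≤ (q : Int) then 0 else t - (q : Int)

-- A's list after the head has processed positions < s
def mlist (ft : List Int) : Nat → List Int
  | 0 => ft
  | s + 1 =>
    let m := mlist ft s
    if actB ft s then m.set (s % ft.length) (m.getD (s % ft.length) 0 - 1) else m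

-- ---- round-level model used for B: after R whole rounds ----

-- is food t still uneaten after R whole rounds?
def predR (R : Nat) : Int → Bool := fun t => decide (t < 0) || decide ((R : Int) < t)

-- number of still-uneaten foods after R whole rounds (B's m)
def mAct (ft : List Int) (R : Nat) : Nat := ft.countP (predR R)

-- seconds eaten during the first R whole rounds
def gterm (t : Int) (v : Nat) : Nat := if t < 0 then v else min v t.toNat
def ERounds (ft : List Int) (R : Nat) : Nat :=
  ∑ i ∈ Finset.range ft.length, gterm (ft.getD i 0) R

-- B's remaining list after R whole rounds
def mcur (ft : List Int) (R : Nat) : List Int := ft.map (fun t => curV t R)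

lemma mlist_length (ft : List Int) (s : Nat) : (mlist ft s).length = ft.length := by
  induction s with
  | zero => rfl
  | succ s ih => simp only [mlist]; split <;> simp [ih]

lemma divh (n q r : Nat) (hn : 0 < n) (hr : r < n) : (n * q + r) / n = q := by
  rw [Nat.mul_add_div hn, Nat.div_eq_of_lt hr]
  simp

lemma vis_zero (n j : Nat) (hj : j < n) : visN n 0 j = 0 := by
  unfold visN; exact Nat.div_eq_of_lt (by omega)

lemma vis_self (n s : Nat) (hn : 0 < n) : visN n s (s % n) = s / n := by
  unfold visN
  have h1 : s % n < n := Nat.mod_lt _ hn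
  have h2 := Nat.mod_add_div s n
  have h3 : s + n - 1 - s % n = n * (s / n) + (n - 1) := by omega
  rw [h3, divh n (s/n) (n-1) hn (by omega)]

lemma vis_succ_self (n s : Nat) (hn : 0 < n) : visN n (s + 1) (s % n) = visN n s (s % n) + 1 := by
  rw [vis_self n s hn]
  unfold visN
  have h1 : s % n < n := Nat.mod_lt _ hn
  have h2 := Nat.mod_add_div s n
  have h5 : n * (s / n + 1) = n * (s / n) + n := by ring
  have h3 : s + 1 + n - 1 - s % n = n * (s / n + 1) + 0 := by omega
  rw [h3, divh n (s/n+1) 0 hn hn]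

lemma vis_succ_ne (n s j : Nat) (hn : 0 < n) (hj : j < n) (hne : j ≠ s % n) :
    visN n (s + 1) j = visN n s j := by
  unfold visN
  have h1 : s % n < n := Nat.mod_lt _ hn
  have h2 := Nat.mod_add_div s n
  rcases Nat.lt_or_ge j (s % n) with h | h
  · have h5 : n * (s / n + 1) = n * (s / n) + n := by ring
    have h6 : s + 1 + n - 1 - j = n * (s / n + 1) + (s % n - j) := by omega
    have h7 : s + n - 1 - j = n * (s / n + 1) + (s % n - j - 1) := by omega
    rw [h6, h7, divh n _ _ hn (by omega), divh n _ _ hn (by omega)]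
  · have hgt : s % n < j := by omega
    have h3 : s + 1 + n - 1 - j = n * (s / n) + (n - (j - s % n)) := by omega
    have h4 : s + n - 1 - j = n * (s / n) + (n - 1 - (j - s % n)) := by omega
    rw [h3, h4, divh n _ _ hn (by omega), divh n _ _ hn (by omega)]

lemma vis_mul (n R i : Nat) (hn : 0 < n) (hi : i < n) : visN n (R * n) i = R := by
  unfold visN
  have h3 : R * n + n - 1 - i = n * R + (n - 1 - i) := by
    have := Nat.mul_comm R n; omega
  rw [h3, divh n _ _ hn (by omega)]

lemma mlist_getD (ft : List Int) (s j : Nat) (hj : j < ft.length) :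
    (mlist ft s).getD j 0 = curV (ft.getD j 0) (visN ft.length s j) := by
  have hn : 0 < ft.length := by omega
  induction s with
  | zero =>
    rw [vis_zero _ _ hj]
    unfold mlist curV
    split
    · simp
    · simp only [Nat.cast_zero]
      split <;> omega
  | succ s ih =>
    by_cases hcase : j = s % ft.length
    · subst hcase
      rw [vis_succ_self _ _ hn]
      by_cases hact : actB ft s = true
      · have hlen : s % ft.length < (mlist ft s).length := by rw [mlist_length]; exact hj
        have hset : (mlist ft (s+1)).getD (s % ft.length) 0
            = (mlist ft s).getD (s % ft.length) 0 - 1 := by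
          simp only [mlist, hact, if_true]
          simp [List.getD_eq_getElem?_getD, hlen]
        rw [hset, ih]
        unfold actB at hact
        simp only [Bool.or_eq_true, decide_eq_true_eq] at hact
        rw [vis_self _ _ hn]
        unfold curV
        split_ifs <;> push_cast <;> omega
      · simp only [Bool.not_eq_true] at hact
        have hsame : mlist ft (s+1) = mlist ft s := by
          simp [mlist, hact]
        rw [hsame, ih]
        unfold actB at hact
        simp only [Bool.or_eq_false_iff, decide_eq_false_iff_not, not_lt] at hact
        rw [vis_self _ _ hn]
        unfold curV
        split_ifs <;> push_cast <;> omega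
    · by_cases hact : actB ft s = true
      · have hset : (mlist ft (s+1)).getD j 0 = (mlist ft s).getD j 0 := by
          simp only [mlist, hact, if_true]
          simp [List.getD_eq_getElem?_getD, List.getElem?_set_ne (by omega : s % ft.length ≠ j)]
        rw [hset, ih, vis_succ_ne _ _ _ hn hj hcase]
      · simp only [Bool.not_eq_true] at hact
        have hsame : mlist ft (s+1) = mlist ft s := by simp [mlist, hact]
        rw [hsame, ih, vis_succ_ne _ _ _ hn hj hcase]

lemma cntA_succ (ft : List Int) (s : Nat) :
    cntA ft (s + 1) = cntA ft s + (if actB ft s then 1 else 0) := by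
  unfold cntA
  rw [List.range_succ, List.countP_append]
  simp [List.countP_cons]

lemma cntA_mono (ft : List Int) {s s' : Nat} (h : s ≤ s') : cntA ft s ≤ cntA ft s' := by
  unfold cntA
  exact (List.range_sublist.mpr h).countP_le

lemma act_mono_false (ft : List Int) {s s' : Nat}
    (h : actB ft s = false) (hle : s ≤ s') (hmod : s % ft.length = s' % ft.length) :
    actB ft s' = false := by
  unfold actB at *
  simp only [Bool.or_eq_false_iff, decide_eq_false_iff_not, not_lt] at *
  rw [← hmod]
  refine ⟨h.1, ?_⟩
  have h2 := h.2
  have hdiv : s / ft.length ≤ s' / ft.length := Nat.div_le_div_right hle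
  have hdiv' : ((s / ft.length : Nat) : Int) ≤ ((s' / ft.length : Nat) : Int) := by exact_mod_cast hdiv
  omega

lemma succ_mod (s n : Nat) : (s % n + 1) % n = (s + 1) % n := by
  conv_rhs => rw [Nat.add_mod]
  rw [Nat.add_mod (s % n) 1]
  simp [Nat.mod_mod]

-- a full window of n consecutive inactive positions below an active position is impossible
lemma window_absurd (ft : List Int) (a m : Nat) (hn : 0 < ft.length)
    (hact : actB ft m = true)
    (hall : ∀ j, a ≤ j → j ≤ a + (ft.length - 1) → actB ft j = false)
    (hm : a + (ft.length - 1) ≤ m) : False := by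
  set n := ft.length with hnd
  set p := a + (m - a) % n with hp
  have hpa : a ≤ p := by omega
  have hmodlt : (m - a) % n < n := Nat.mod_lt _ hn
  have hpw : p ≤ a + (n - 1) := by omega
  have hpm : p ≤ m := by
    have := Nat.mod_le (m - a) n
    omega
  have hmod : p % n = m % n := by
    rw [hp]
    conv_rhs => rw [show m = a + (m - a) from by omega]
    conv_rhs => rw [Nat.add_mod a (m - a) n]
    rw [Nat.add_mod a ((m - a) % n) n]
    simp [Nat.mod_mod]
  have hres := act_mono_false ft (hall p hpa hpw) hpm hmod
  rw [hact] at hres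
  exact Bool.noConfusion hres

-- ---- counting eats in closed form ----

def Gsum (ft : List Int) (s : Nat) : Nat :=
  ∑ i ∈ Finset.range ft.length, gterm (ft.getD i 0) (visN ft.length s i)

lemma getD_of_lt (l : List Int) (i : Nat) (d : Int) (h : i < l.length) : l.getD i d = l[i] := by
  simp [List.getD_eq_getElem?_getD, List.getElem?_eq_getElem h]

lemma act_iff (ft : List Int) (s : Nat) :
    actB ft s = true ↔
      (ft.getD (s % ft.length) 0 < 0 ∨ ((s / ft.length : Nat) : Int) < ft.getD (s % ft.length) 0) := by
  unfold actB
  simp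

lemma gterm_succ (t : Int) (q : Nat) :
    gterm t (q + 1) = gterm t q + (if (t < 0 ∨ ((q : Nat) : Int) < t) then 1 else 0) := by
  unfold gterm
  by_cases h1 : t < 0
  · simp [h1]
  · simp only [h1, if_false, false_or]
    by_cases h2 : ((q : Nat) : Int) < t
    · simp only [h2, if_true]
      omega
    · simp only [h2, if_false]
      omega

lemma Gsum_succ (ft : List Int) (s : Nat) (hn : 0 < ft.length) :
    Gsum ft (s + 1) = Gsum ft s + (if actB ft s then 1 else 0) := by
  classical
  unfold Gsum
  have hmem : s % ft.length ∈ Finset.range ft.length := by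
    simp [Nat.mod_lt _ hn]
  rw [← Finset.sum_erase_add _ _ hmem, ← Finset.sum_erase_add _ _ hmem]
  have hcong : ∑ i ∈ (Finset.range ft.length).erase (s % ft.length),
      gterm (ft.getD i 0) (visN ft.length (s+1) i)
      = ∑ i ∈ (Finset.range ft.length).erase (s % ft.length),
      gterm (ft.getD i 0) (visN ft.length s i) := by
    apply Finset.sum_congr rfl
    intro i hi
    have h1 := Finset.mem_erase.mp hi
    have h2 := Finset.mem_range.mp h1.2
    rw [vis_succ_ne _ _ _ hn h2 h1.1]
  have hite : (if (ft.getD (s % ft.length) 0 < 0 ∨ ((s / ft.length : Nat) : Int) < ft.getD (s % ft.length) 0) then (1:Nat) else 0)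
      = (if actB ft s then 1 else 0) := by
    by_cases h : actB ft s = true
    · rw [h, if_pos ((act_iff ft s).mp h), if_pos rfl]
    · simp only [Bool.not_eq_true] at h
      have hp : ¬ (ft.getD (s % ft.length) 0 < 0 ∨ ((s / ft.length : Nat) : Int) < ft.getD (s % ft.length) 0) := by
        intro hc
        rw [(act_iff ft s).mpr hc] at h
        exact Bool.noConfusion h
      rw [h, if_neg hp]
      simp
  rw [hcong, vis_succ_self _ _ hn, vis_self _ _ hn, gterm_succ, hite]
  omega

lemma cntA_eq_Gsum (ft : List Int) (hn : 0 < ft.length) (s : Nat) : cntA ft s = Gsum ft s := by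
  induction s with
  | zero =>
    unfold cntA Gsum
    simp only [List.range_zero, List.countP_nil]
    symm
    apply Finset.sum_eq_zero
    intro i hi
    rw [vis_zero _ _ (Finset.mem_range.mp hi)]
    unfold gterm
    split <;> simp
  | succ s ih =>
    rw [cntA_succ, Gsum_succ ft s hn, ih]

-- (l.map f).sum as a Finset.range sum over getD
lemma map_sum_eq_finset {M : Type} [AddCommMonoid M] (f : Int → M) (l : List Int) :
    (l.map f).sum = ∑ i ∈ Finset.range l.length, f (l.getD i 0) := by
  induction l with
  | nil => simp
  | cons a l ih =>
    rw [List.map_cons, List.sum_cons, List.length_cons, Finset.sum_range_succ']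
    simp only [List.getD_cons_succ, List.getD_cons_zero]
    rw [ih, add_comm]

lemma Gsum_le_sumPos (ft : List Int) (hpos : ∀ t ∈ ft, 0 ≤ t) (s : Nat) :
    Gsum ft s ≤ pvSumPos ft := by
  unfold Gsum pvSumPos
  rw [map_sum_eq_finset Int.toNat ft]
  apply Finset.sum_le_sum
  intro i hi
  have hilt := Finset.mem_range.mp hi
  have hmem : ft.getD i 0 ∈ ft := by
    rw [getD_of_lt _ _ _ hilt]
    exact List.getElem_mem hilt
  have h0 : 0 ≤ ft.getD i 0 := hpos _ hmem
  unfold gterm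
  split
  · omega
  · exact min_le_right _ _

-- ---- A's loop: the two behaviours ----

-- case 1: the k-th eat happens, at position sk; the loop returns (sk+1) % n + 1
lemma loopA_hit (ft : List Int) (k : Int) (hn : 0 < ft.length) (sk : Nat)
    (hact : actB ft sk = true) (hk : (cntA ft sk : Int) + 1 = k) :
    ∀ (fuel s head cnt zc : Nat), s ≤ sk → sk + 1 ≤ s + fuel →
    head % ft.length = s % ft.length → cnt = cntA ft s →
    zc ≤ s → zc < ft.length → (∀ j, s - zc ≤ j → j < s → actB ft j = false) →
    loopA k (mlist ft s) head cnt zc fuel = (((sk + 1) % ft.length + 1 : Nat) : Int) := by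
  intro fuel
  induction fuel with
  | zero => intro s head cnt zc h1 h2; omega
  | succ fuel ih =>
    intro s head cnt zc hssk hfuel hhead hcnt hzcs hzcn hwin
    have hlen : (mlist ft s).length = ft.length := mlist_length ft s
    have hnz : ¬ ((mlist ft s).length = 0) := by omega
    have hjlt : s % ft.length < ft.length := Nat.mod_lt _ hn
    have hv : (mlist ft s).getD (head % (mlist ft s).length) 0
        = curV (ft.getD (s % ft.length) 0) (s / ft.length) := by
      rw [hlen, hhead, mlist_getD ft s _ hjlt, vis_self _ _ hn]
    simp only [loopA]
    rw [if_neg hnz]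
    by_cases hacts : actB ft s = true
    · -- the head eats at position s
      have hactp := (act_iff ft s).mp hacts
      have hvne : ¬ ((mlist ft s).getD (head % (mlist ft s).length) 0 = 0) := by
        rw [hv]; unfold curV
        have hq := Int.natCast_nonneg (s / ft.length)
        rcases hactp with hp | hp <;> split_ifs <;> omega
      rw [if_neg hvne]
      rcases eq_or_lt_of_le hssk with heq | hlt
      · -- s = sk : this is the k-th eat; the loop breaks and returns
        rw [if_pos (Or.inl (by rw [hcnt, heq]; exact hk) :
          (cnt : Int) + 1 = k ∨ (mlist ft s).length = 0)]
        rw [hlen, hhead, heq, succ_mod]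
      · -- s < sk : not yet the k-th eat; cnt+1 < k
        have hc1 : cntA ft (s + 1) = cntA ft s + 1 := by rw [cntA_succ, hacts]; simp
        have hc2 : cntA ft (s + 1) ≤ cntA ft sk := cntA_mono ft (by omega)
        have hcond : ¬ ((cnt : Int) + 1 = k ∨ (mlist ft s).length = 0) := by
          rw [hcnt]
          push_neg
          refine ⟨?_, by omega⟩
          have hc2' : (cntA ft (s+1) : Int) ≤ (cntA ft sk : Int) := by exact_mod_cast hc2
          omega
        rw [if_neg hcond, hlen, hhead]
        have hargs : (mlist ft s).set (s % ft.length)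
            ((mlist ft s).getD (s % ft.length) 0 - 1) = mlist ft (s + 1) := by
          simp only [mlist, hacts, if_true]
        rw [hargs]
        exact ih (s + 1) _ (cnt + 1) 0 (by omega) (by omega) (succ_mod s ft.length)
          (by rw [hcnt]; omega) (by omega) hn (by intro j hj1 hj2; omega)
    · -- the head skips a zero at position s
      simp only [Bool.not_eq_true] at hacts
      have hactp : ¬ (ft.getD (s % ft.length) 0 < 0 ∨
          ((s / ft.length : Nat) : Int) < ft.getD (s % ft.length) 0) := by
        intro hc
        rw [(act_iff ft s).mpr hc] at hacts
        exact Bool.noConfusion hacts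
      push_neg at hactp
      have hslt : s < sk := by
        rcases eq_or_lt_of_le hssk with heq | h
        · rw [heq] at hacts; rw [hacts] at hact; exact Bool.noConfusion hact
        · exact h
      have hvz : (mlist ft s).getD (head % (mlist ft s).length) 0 = 0 := by
        rw [hv]; unfold curV
        have hq := Int.natCast_nonneg (s / ft.length)
        split_ifs <;> omega
      rw [if_pos hvz]
      have hzcne : ¬ (zc + 1 = (mlist ft s).length) := by
        rw [hlen]
        intro hzceq
        apply window_absurd ft (s - zc) sk hn hact
        · intro j hj1 hj2
          rcases Nat.lt_or_ge j s with hjs | hjs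
          · exact hwin j hj1 hjs
          · have hjj : j = s := by omega
            rw [hjj]; exact hacts
        · omega
      rw [if_neg hzcne, hlen, hhead]
      have hsame : mlist ft s = mlist ft (s + 1) := by simp [mlist, hacts]
      rw [hsame]
      exact ih (s + 1) _ cnt (zc + 1) (by omega) (by omega) (succ_mod s ft.length)
        (by rw [hcnt, cntA_succ, hacts]; simp) (by omega)
        (by rw [hlen] at hzcne; omega)
        (by
          intro j hj1 hj2
          rcases Nat.lt_or_ge j s with hjs | hjs
          · exact hwin j (by omega) hjs
          · have hjj : j = s := by omega
            rw [hjj]; exact hacts)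

-- case 2: the k-th eat never happens (k ≤ 0 or more than all the food); the loop returns -1
lemma loopA_miss (ft : List Int) (k : Int) (hn : 0 < ft.length)
    (hpos : ∀ t ∈ ft, 0 ≤ t) (hk : k ≤ 0 ∨ (pvSumPos ft : Int) < k) :
    ∀ (fuel s head cnt zc : Nat),
    head % ft.length = s % ft.length → cnt = cntA ft s →
    zc ≤ s → zc < ft.length → (∀ j, s - zc ≤ j → j < s → actB ft j = false) →
    loopA k (mlist ft s) head cnt zc fuel = -1 := by
  intro fuel
  induction fuel with
  | zero => intro s head cnt zc _ _ _ _ _; simp [loopA]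
  | succ fuel ih =>
    intro s head cnt zc hhead hcnt hzcs hzcn hwin
    have hlen : (mlist ft s).length = ft.length := mlist_length ft s
    have hnz : ¬ ((mlist ft s).length = 0) := by omega
    have hjlt : s % ft.length < ft.length := Nat.mod_lt _ hn
    have hv : (mlist ft s).getD (head % (mlist ft s).length) 0
        = curV (ft.getD (s % ft.length) 0) (s / ft.length) := by
      rw [hlen, hhead, mlist_getD ft s _ hjlt, vis_self _ _ hn]
    simp only [loopA]
    rw [if_neg hnz]
    by_cases hacts : actB ft s = true
    · have hactp := (act_iff ft s).mp hacts
      have hvne : ¬ ((mlist ft s).getD (head % (mlist ft s).length) 0 = 0) := by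
        rw [hv]; unfold curV
        have hq := Int.natCast_nonneg (s / ft.length)
        rcases hactp with hp | hp <;> split_ifs <;> omega
      rw [if_neg hvne]
      have hc1 : cntA ft (s + 1) = cntA ft s + 1 := by rw [cntA_succ, hacts]; simp
      have hbound : cntA ft (s + 1) ≤ pvSumPos ft := by
        rw [cntA_eq_Gsum ft hn]
        exact Gsum_le_sumPos ft hpos _
      have hcond : ¬ ((cnt : Int) + 1 = k ∨ (mlist ft s).length = 0) := by
        rw [hcnt]
        push_neg
        refine ⟨?_, by omega⟩
        have hb : (cntA ft (s+1) : Int) ≤ (pvSumPos ft : Int) := by exact_mod_cast hbound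
        rcases hk with h | h <;> omega
      rw [if_neg hcond, hlen, hhead]
      have hargs : (mlist ft s).set (s % ft.length)
          ((mlist ft s).getD (s % ft.length) 0 - 1) = mlist ft (s + 1) := by
        simp only [mlist, hacts, if_true]
      rw [hargs]
      exact ih (s + 1) _ (cnt + 1) 0 (succ_mod s ft.length)
        (by rw [hcnt]; omega) (by omega) hn (by intro j hj1 hj2; omega)
    · simp only [Bool.not_eq_true] at hacts
      have hactp : ¬ (ft.getD (s % ft.length) 0 < 0 ∨
          ((s / ft.length : Nat) : Int) < ft.getD (s % ft.length) 0) := by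
        intro hc
        rw [(act_iff ft s).mpr hc] at hacts
        exact Bool.noConfusion hacts
      push_neg at hactp
      have hvz : (mlist ft s).getD (head % (mlist ft s).length) 0 = 0 := by
        rw [hv]; unfold curV
        have hq := Int.natCast_nonneg (s / ft.length)
        split_ifs <;> omega
      rw [if_pos hvz]
      by_cases hzceq : zc + 1 = (mlist ft s).length
      · rw [if_pos hzceq]
      · rw [if_neg hzceq, hlen, hhead]
        have hsame : mlist ft s = mlist ft (s + 1) := by simp [mlist, hacts]
        rw [hsame]
        exact ih (s + 1) _ cnt (zc + 1) (succ_mod s ft.length)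
          (by rw [hcnt, cntA_succ, hacts]; simp) (by omega)
          (by rw [hlen] at hzceq; omega)
          (by
            intro j hj1 hj2
            rcases Nat.lt_or_ge j s with hjs | hjs
            · exact hwin j (by omega) hjs
            · have hjj : j = s := by omega
              rw [hjj]; exact hacts)

-- counting active positions inside one round, as a countP over a prefix of the list
lemma cntA_block (ft : List Int) (hn : 0 < ft.length) (R : Nat) :
    ∀ b : Nat, b ≤ ft.length →
    cntA ft (R * ft.length + b)
      = cntA ft (R * ft.length) + (ft.take b).countP
          (fun t => decide (t < 0) || decide ((R : Int) < t)) := by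
  intro b
  induction b with
  | zero => simp
  | succ b ih =>
    intro hb
    have hblt : b < ft.length := by omega
    have hmod : (R * ft.length + b) % ft.length = b := by
      conv_lhs => rw [Nat.mul_comm]
      rw [Nat.mul_add_mod]
      exact Nat.mod_eq_of_lt hblt
    have hdiv : (R * ft.length + b) / ft.length = R := by
      have h3 : R * ft.length + b = ft.length * R + b := by ring
      rw [h3, divh _ _ _ hn hblt]
    have htake : ft.take (b + 1) = ft.take b ++ [ft.getD b 0] := by
      rw [List.take_succ]
      congr
      rw [List.getElem?_eq_getElem hblt]
      simp [List.getD_eq_getElem?_getD, List.getElem?_eq_getElem hblt]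
    rw [show R * ft.length + (b + 1) = (R * ft.length + b) + 1 from by omega,
      cntA_succ, ih (by omega), htake, List.countP_append]
    unfold actB
    rw [hmod, hdiv]
    simp [List.countP_cons]
    split <;> omega

-- ---- the round-level facts for B ----

lemma cntA_mul (ft : List Int) (hn : 0 < ft.length) (R : Nat) :
    cntA ft (R * ft.length) = ERounds ft R := by
  rw [cntA_eq_Gsum ft hn]
  unfold Gsum ERounds
  apply Finset.sum_congr rfl
  intro i hi
  rw [vis_mul _ _ _ hn (Finset.mem_range.mp hi)]

lemma ERounds_succ (ft : List Int) (hn : 0 < ft.length) (R : Nat) :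
    ERounds ft (R + 1) = ERounds ft R + mAct ft R := by
  have h1 := cntA_block ft hn R ft.length (le_refl _)
  rw [List.take_length] at h1
  have h2 : R * ft.length + ft.length = (R + 1) * ft.length := by ring
  rw [h2] at h1
  rw [← cntA_mul ft hn, ← cntA_mul ft hn, h1]
  rfl

lemma predR_mono (R R' : Nat) (h : R ≤ R') (t : Int) (ht : predR R' t = true) : predR R t = true := by
  unfold predR at *
  simp only [Bool.or_eq_true, decide_eq_true_eq] at *
  omega

lemma mAct_mono (ft : List Int) {R R' : Nat} (h : R ≤ R') : mAct ft R' ≤ mAct ft R :=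
  List.countP_mono_left (fun t _ ht => predR_mono R R' h t ht)

lemma countP_lt_of_mem {p q : Int → Bool} :
    ∀ (l : List Int), (∀ t ∈ l, q t = true → p t = true) →
    ∀ t0, t0 ∈ l → p t0 = true → q t0 = false → l.countP q < l.countP p := by
  intro l
  induction l with
  | nil => intro _ t0 h0; simp at h0
  | cons a rest ih =>
    intro hpq t0 h0 hp hq
    rw [List.countP_cons, List.countP_cons]
    rcases List.mem_cons.mp h0 with heq | hmem
    · subst heq
      have hle : rest.countP q ≤ rest.countP p :=
        List.countP_mono_left (fun t ht => hpq t (List.mem_cons_of_mem _ ht))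
      rw [hp, hq]
      simp
      omega
    · have hlt := ih (fun t ht => hpq t (List.mem_cons_of_mem _ ht)) t0 hmem hp hq
      have : (if q a = true then 1 else 0) ≤ (if p a = true then 1 else 0) := by
        by_cases h : q a = true
        · rw [h, hpq a List.mem_cons_self h]
        · simp only [Bool.not_eq_true] at h
          rw [h]; simp
      omega

lemma curV_ne_iff (t : Int) (R : Nat) : (curV t R ≠ 0) ↔ (predR R t = true) := by
  unfold curV predR
  simp only [Bool.or_eq_true, decide_eq_true_eq]
  split_ifs <;> omega

lemma curV_fun_eq (R : Nat) :
    (fun t => decide (curV t R ≠ 0)) = predR R := by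
  funext t
  by_cases h : curV t R = 0
  · have h2 : predR R t = false := by
      by_cases hp : predR R t = true
      · exact absurd hp (by rw [← curV_ne_iff] at *; omega)
      · simpa using hp
    simp [h, h2]
  · simp [h, (curV_ne_iff t R).mp h]

lemma mcur_length (ft : List Int) (R : Nat) : (mcur ft R).length = ft.length := by
  simp [mcur]

lemma mcur_countP (ft : List Int) (R : Nat) :
    (mcur ft R).countP (fun t => decide (t ≠ 0)) = mAct ft R := by
  unfold mcur mAct
  rw [List.countP_map]
  have : ((fun t => decide (t ≠ 0)) ∘ fun t => curV t R) = predR R := by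
    have h := curV_fun_eq R
    funext t
    have := congrFun h t
    simpa using this
  rw [this]

lemma mcur_getD (ft : List Int) (R : Nat) (j : Nat) (hj : j < ft.length) :
    (mcur ft R).getD j 0 = curV (ft.getD j 0) R := by
  have hj' : j < (mcur ft R).length := by rw [mcur_length]; exact hj
  rw [getD_of_lt _ _ _ hj', getD_of_lt _ _ _ hj]
  simp [mcur]

lemma mcur_zero (ft : List Int) : mcur ft 0 = ft := by
  unfold mcur
  have : ∀ t ∈ ft, curV t 0 = t := by
    intro t _
    unfold curV
    split_ifs <;> omega
  calc ft.map (fun t => curV t 0) = ft.map id := List.map_congr_left (by simpa using this)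
    _ = ft := List.map_id ft

lemma ERounds_zero (ft : List Int) : ERounds ft 0 = 0 := by
  unfold ERounds
  apply Finset.sum_eq_zero
  intro i _
  unfold gterm
  split <;> simp

lemma mAct_le_len (ft : List Int) (R : Nat) : mAct ft R ≤ ft.length :=
  List.countP_le_length

-- after rN more rounds, when no positive remaining is overshot
lemma ERounds_add (ft : List Int) (hn : 0 < ft.length) (R rN : Nat)
    (h : ∀ t ∈ ft, predR R t = true → t < 0 ∨ (R : Int) + rN ≤ t) :
    ERounds ft (R + rN) = ERounds ft R + rN * mAct ft R := by
  induction rN with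
  | zero => simp
  | succ r ih =>
    have hsub : ∀ t ∈ ft, predR R t = true → t < 0 ∨ (R : Int) + r ≤ t := by
      intro t ht hp
      rcases h t ht hp with h1 | h1
      · exact Or.inl h1
      · right; push_cast at h1 ⊢; omega
    have hconst : mAct ft (R + r) = mAct ft R := by
      unfold mAct
      apply List.countP_congr
      intro t ht
      by_cases hp : predR R t = true
      · rcases h t ht hp with h1 | h1
        · have : predR (R + r) t = true := by unfold predR; simp [h1]
          rw [hp, this]
        · have : predR (R + r) t = true := by
            unfold predR
            simp only [Bool.or_eq_true, decide_eq_true_eq]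
            right; push_cast at h1 ⊢; omega
          rw [hp, this]
      · have hp' : predR R t = false := by simpa using hp
        have : predR (R + r) t = false := by
          by_cases hq : predR (R + r) t = true
          · exact absurd (predR_mono R (R + r) (by omega) t hq) (by simp [hp'])
          · simpa using hq
        rw [hp', this]
    rw [show R + (r + 1) = (R + r) + 1 from rfl, ERounds_succ ft hn, ih hsub, hconst]
    ring

lemma mcur_add (ft : List Int) (R rN : Nat)
    (h : ∀ t ∈ ft, predR R t = true → t < 0 ∨ (R : Int) + rN ≤ t) :
    (mcur ft R).map (fun t => if t ≠ 0 then t - (rN : Int) else t) = mcur ft (R + rN) := by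
  unfold mcur
  rw [List.map_map]
  apply List.map_congr_left
  intro t ht
  simp only [Function.comp_apply]
  by_cases hz : curV t R = 0
  · have hz2 : curV t (R + rN) = 0 := by
      unfold curV at *
      push_cast at *
      split_ifs at hz ⊢ <;> omega
    simp [hz, hz2]
  · have hp := (curV_ne_iff t R).mp hz
    rcases h t ht hp with h1 | h1
    · have e1 : curV t R = t - R := by unfold curV; simp [h1]
      have e2 : curV t (R + rN) = t - (R + rN : Nat) := by unfold curV; simp [h1]
      simp only [hz, if_true, ne_eq, ite_not]
      rw [e1, e2]
      push_cast
      ring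
    · have hpos : (R : Int) < t := by
        unfold predR at hp
        simp only [Bool.or_eq_true, decide_eq_true_eq] at hp
        have hR0 : (0 : Int) ≤ (R : Int) + rN := by positivity
        omega
      have e1 : curV t R = t - R := by
        unfold curV
        split_ifs <;> omega
      have e2 : curV t (R + rN) = t - (R + rN : Nat) := by
        unfold curV
        push_cast at h1
        split_ifs <;> push_cast <;> omega
      simp only [hz, if_true, ne_eq, ite_not]
      rw [e1, e2]
      push_cast
      ring

-- the running-minimum fold that computes B's `rounds`
lemma roundsFold_spec : ∀ (l : List Int) (acc : Int), 0 < acc →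
    0 < l.foldl (fun r t => if 0 < t ∧ t < r then t else r) acc ∧
    l.foldl (fun r t => if 0 < t ∧ t < r then t else r) acc ≤ acc ∧
    (∀ t ∈ l, 0 < t → l.foldl (fun r t => if 0 < t ∧ t < r then t else r) acc ≤ t) ∧
    (l.foldl (fun r t => if 0 < t ∧ t < r then t else r) acc = acc ∨
      l.foldl (fun r t => if 0 < t ∧ t < r then t else r) acc ∈ l) := by
  intro l
  induction l with
  | nil => intro acc h; exact ⟨h, le_refl _, by simp, Or.inl rfl⟩
  | cons a rest ih =>
    intro acc hacc
    simp only [List.foldl_cons]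
    by_cases hc : 0 < a ∧ a < acc
    · rw [if_pos hc]
      obtain ⟨h1, h2, h3, h4⟩ := ih a hc.1
      refine ⟨h1, by omega, ?_, ?_⟩
      · intro t ht hpos
        rcases List.mem_cons.mp ht with he | hm
        · subst he; omega
        · exact h3 t hm hpos
      · rcases h4 with h | h
        · exact Or.inr (List.mem_cons.mpr (Or.inl h))
        · exact Or.inr (List.mem_cons.mpr (Or.inr h))
    · rw [if_neg hc]
      obtain ⟨h1, h2, h3, h4⟩ := ih acc hacc
      refine ⟨h1, h2, ?_, ?_⟩
      · intro t ht hpos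
        rcases List.mem_cons.mp ht with he | hm
        · subst he; omega
        · exact h3 t hm hpos
      · rcases h4 with h | h
        · exact Or.inl h
        · exact Or.inr (List.mem_cons.mpr (Or.inr h))

-- Source B's scan finds the position of the `need`-th uneaten food
lemma pickB_spec (n : Nat) :
    ∀ (l : List Int) (i : Nat) (need : Int) (j : Nat), j < l.length →
    l.getD j 0 ≠ 0 →
    (((l.take j).countP (fun t => decide (t ≠ 0)) : Int) + 1 = need) →
    pickB n l i need = (((i + j + 1) % n + 1 : Nat) : Int) := by
  intro l
  induction l with
  | nil => intro i need j hj; simp at hj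
  | cons t rest ih =>
    intro i need j hj hcond hcount
    cases j with
    | zero =>
      simp only [List.getD_cons_zero] at hcond
      simp only [List.take_zero, List.countP_nil, Nat.cast_zero] at hcount
      have hneed : need - 1 = 0 := by omega
      simp only [pickB]
      rw [if_pos hcond, if_pos hneed]
    | succ j' =>
      by_cases hct : t ≠ 0
      · have hbt : decide (t ≠ 0) = true := by simp [hct]
        simp only [List.take_succ_cons, List.countP_cons, hbt, if_true] at hcount
        have hneed : ¬ (need - 1 = 0) := by push_cast at hcount; omega
        simp only [pickB]
        rw [if_pos hct, if_neg hneed]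
        rw [show i + (j' + 1) + 1 = (i + 1) + j' + 1 from by omega]
        apply ih (i + 1) (need - 1) j' (by simpa using hj) (by simpa using hcond)
        push_cast at hcount ⊢
        omega
      · have hbt : decide (t ≠ 0) = false := by simpa using hct
        simp only [List.take_succ_cons, List.countP_cons, hbt, Bool.false_eq_true,
          if_false, Nat.add_zero] at hcount
        simp only [pickB]
        rw [if_neg hct]
        rw [show i + (j' + 1) + 1 = (i + 1) + j' + 1 from by omega]
        apply ih (i + 1) need j' (by simpa using hj) (by simpa using hcond)
        push_cast at hcount ⊢
        omega

lemma countP_take_mcur (ft : List Int) (R j : Nat) :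
    ((mcur ft R).take j).countP (fun t => decide (t ≠ 0)) = (ft.take j).countP (predR R) := by
  unfold mcur
  rw [← List.map_take, List.countP_map]
  have : ((fun t => decide (t ≠ 0)) ∘ fun t => curV t R) = predR R := by
    have h := curV_fun_eq R
    funext t
    have := congrFun h t
    simpa using this
  rw [this]

-- ---- the main induction: B's loop, started at round R, computes A's answer ----

lemma loopB_eq (ft : List Int) (k : Int) (hne : ft ≠ []) (hk1 : 1 ≤ k) :
    ∀ (fuel R : Nat), (R : Int) ≤ (ERounds ft R : Int) →
    1 ≤ k - (ERounds ft R : Int) →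
    ((1 ≤ fuel ∧ k - (ERounds ft R : Int) ≤ (mAct ft R : Int)) ∨ mAct ft R + 2 ≤ fuel) →
    loopB ft.length (mcur ft R) (k - (ERounds ft R : Int)) fuel = solution ft k := by
  have hn : 0 < ft.length := List.length_pos_iff.mpr hne
  intro fuel
  induction fuel with
  | zero =>
    intro R _ hneed hfuel
    rcases hfuel with h | h <;> omega
  | succ fuel ih =>
    intro R hRle hneed hfuel
    set n := ft.length with hnd
    set need := k - (ERounds ft R : Int) with hneedd
    simp only [loopB]
    rw [mcur_countP ft R]
    by_cases hm0 : mAct ft R = 0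
    · -- no food left: A returns -1 as well (k exceeds the total food)
      rw [if_pos hm0]
      have hall : ∀ t ∈ ft, predR R t = false := by
        intro t ht
        have := List.countP_eq_zero.mp hm0 t ht
        simpa using this
      have hpos : ∀ t ∈ ft, 0 ≤ t := by
        intro t ht
        have := hall t ht
        unfold predR at this
        simp only [Bool.or_eq_false_iff, decide_eq_false_iff_not, not_lt] at this
        omega
      have hsat : ERounds ft R = pvSumPos ft := by
        unfold ERounds pvSumPos
        rw [map_sum_eq_finset Int.toNat ft]
        apply Finset.sum_congr rfl
        intro i hi
        have hilt := Finset.mem_range.mp hi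
        have hmem : ft.getD i 0 ∈ ft := by
          rw [getD_of_lt _ _ _ hilt]; exact List.getElem_mem hilt
        have h1 := hall _ hmem
        unfold predR at h1
        simp only [Bool.or_eq_false_iff, decide_eq_false_iff_not, not_lt] at h1
        unfold gterm
        rw [if_neg (by omega)]
        have : (ft.getD i 0).toNat ≤ R := by omega
        omega
      have hklt : (pvSumPos ft : Int) < k := by rw [← hsat]; omega
      unfold solution
      have := loopA_miss ft k hn hpos (Or.inr hklt) (fuelA ft k) 0 0 0 0 rfl rfl
        (le_refl 0) hn (by intro j h1 h2; omega)
      simpa [mlist] using this.symm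
    · rw [if_neg hm0]
      have hm1 : 1 ≤ mAct ft R := by omega
      by_cases hhit : need ≤ (mAct ft R : Int)
      · -- the k-th eat happens in round R+1: find its position sk via A's count
        rw [if_pos hhit]
        have hEsucc : ERounds ft (R + 1) = ERounds ft R + mAct ft R := ERounds_succ ft hn R
        have hex : ∃ m', k ≤ (cntA ft m' : Int) := by
          refine ⟨(R + 1) * n, ?_⟩
          rw [cntA_mul ft hn, hEsucc]
          push_cast
          omega
        set M := Nat.find hex with hMdef
        have hfind : k ≤ (cntA ft M : Int) := Nat.find_spec hex
        have hMup : M ≤ (R + 1) * n := Nat.find_le (by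
          rw [cntA_mul ft hn, hEsucc]; push_cast; omega)
        have hM1 : R * n < M := by
          by_contra hcon
          push_neg at hcon
          have := cntA_mono ft hcon
          have h2 : (cntA ft M : Int) ≤ (cntA ft (R * n) : Int) := by exact_mod_cast this
          rw [cntA_mul ft hn] at h2
          omega
        set sk := M - 1 with hskdef
        have hskM : sk + 1 = M := by omega
        have hcsk : ¬ k ≤ (cntA ft sk : Int) := Nat.find_min hex (by omega)
        have hact : actB ft sk = true := by
          by_contra h
          simp only [Bool.not_eq_true] at h
          have heq : cntA ft M = cntA ft sk := by
            rw [← hskM, cntA_succ, h]; simp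
          rw [heq] at hfind
          exact hcsk hfind
        have hkc : (cntA ft sk : Int) + 1 = k := by
          have hstep : cntA ft M = cntA ft sk + 1 := by
            rw [← hskM, cntA_succ, hact]; simp
          rw [hstep] at hfind
          push_cast at hfind ⊢
          omega
        -- sk sits in round R+1: sk = R*n + j
        set j := sk - R * n with hjdef
        have hmulsucc : (R + 1) * n = R * n + n := by ring
        have hjlt : j < n := by omega
        have hsksplit : sk = R * n + j := by omega
        have hmod : sk % n = j := by
          rw [hsksplit]
          conv_lhs => rw [Nat.mul_comm]
          rw [Nat.mul_add_mod]
          exact Nat.mod_eq_of_lt hjlt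
        have hdiv : sk / n = R := by
          rw [hsksplit, show R * n + j = n * R + j from by ring, divh _ _ _ hn hjlt]
        -- the count of uneaten foods strictly before j in round R+1
        have hblock := cntA_block ft hn R j (le_of_lt hjlt)
        rw [← hsksplit] at hblock
        have hcount : ((ft.take j).countP (predR R) : Int) + 1 = need := by
          rw [hneedd]
          have : (cntA ft sk : Int) = (cntA ft (R * n) : Int) + ((ft.take j).countP (predR R) : Int) := by
            exact_mod_cast congrArg (Nat.cast : Nat → Int) hblock
          rw [cntA_mul ft hn] at this
          omega
        -- B's scan lands exactly there
        have hgd : (mcur ft R).getD j 0 ≠ 0 := by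
          rw [mcur_getD ft R j hjlt, curV_ne_iff]
          have := (act_iff ft sk).mp hact
          unfold predR
          rw [hmod, hdiv] at this
          simp only [Bool.or_eq_true, decide_eq_true_eq]
          exact this
        have hpick := pickB_spec n (mcur ft R) 0 need j
          (by rw [mcur_length]; exact hjlt) hgd
          (by rw [countP_take_mcur]; exact hcount)
        rw [hpick]
        -- A's loop returns the same position
        have hfuelA : sk + 1 ≤ fuelA ft k := by
          have hRk : (R : Int) ≤ k - 1 := by
            have := hneed
            omega
          have hR1 : R + 1 ≤ k.toNat := by omega
          have h1 : (R + 1) * n ≤ k.toNat * n := Nat.mul_le_mul_right _ hR1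
          have h2 : k.toNat * n ≤ (k.toNat + pvSumPos ft + 2) * (n + 2) :=
            Nat.mul_le_mul (by omega) (by omega)
          unfold fuelA
          rw [← hnd]
          omega
        have hA := loopA_hit ft k hn sk hact hkc (fuelA ft k) 0 0 0 0 (by omega)
          (by omega) rfl (by simp [cntA]) (le_refl 0) hn (by intro a h1 h2; omega)
        unfold solution
        rw [show mlist ft 0 = ft from rfl] at hA
        rw [hA]
        have hfin : (sk + 1) % ft.length = (0 + j + 1) % n := by
          rw [← hnd, hsksplit,
            show R * n + j + 1 = (0 + j + 1) + R * n from by ring,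
            Nat.add_mul_mod_self_right]
        rw [hfin]
      · -- batch rN = rounds more whole rounds and recurse
        rw [if_neg hhit]
        have hneedm : (mAct ft R : Int) + 1 ≤ need := by omega
        set m := mAct ft R with hmd
        set cap := PySem.Int.floordiv (need - 1) (m : Int) with hcapd
        have hmpos : (0 : Int) < (m : Int) := by exact_mod_cast hm1
        have hcap1 : 1 ≤ cap := by
          rw [hcapd, PySem.Int.le_floordiv_iff_mul_le hmpos]
          omega
        have hdm := PySem.Int.floordiv_mul_add_mod (need - 1) (m : Int)
        rw [← hcapd] at hdm
        have hm2 := PySem.Int.mod_nonneg (need - 1) hmpos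
        have hm3 := PySem.Int.mod_lt (need - 1) hmpos
        have hcapmul : cap * (m : Int) ≤ need - 1 := by omega
        have hcapup : need - 1 < cap * (m : Int) + m := by omega
        obtain ⟨hr0, hrcap, hrle, hrmem⟩ := roundsFold_spec (mcur ft R) cap (by omega)
        set r := (mcur ft R).foldl (fun r t => if 0 < t ∧ t < r then t else r) cap with hrd
        set rN := r.toNat with hrNd
        have hrN : (rN : Int) = r := Int.toNat_of_nonneg (by omega)
        have hrN1 : 1 ≤ rN := by omega
        -- no positive remaining food is overshot by r rounds
        have hsafe : ∀ t ∈ ft, predR R t = true → t < 0 ∨ (R : Int) + rN ≤ t := by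
          intro t ht hp
          unfold predR at hp
          simp only [Bool.or_eq_true, decide_eq_true_eq] at hp
          rcases hp with h1 | h1
          · exact Or.inl h1
          · right
            have hmem : curV t R ∈ mcur ft R := by
              unfold mcur
              exact List.mem_map.mpr ⟨t, ht, rfl⟩
            have hcv : curV t R = t - (R : Int) := by
              unfold curV
              split_ifs <;> omega
            have := hrle _ hmem (by omega)
            rw [hcv] at this
            omega
        have hE := ERounds_add ft hn R rN hsafe
        have hmc := mcur_add ft R rN hsafe
        have hneed' : k - (ERounds ft (R + rN) : Int) = need - r * (m : Int) := by
          rw [hE]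
          push_cast
          rw [hneedd]
          rw [← hrN]
          push_cast
          ring
        have hrmul : r * (m : Int) ≤ cap * (m : Int) :=
          mul_le_mul_of_nonneg_right hrcap (by omega)
        have hneed1' : 1 ≤ k - (ERounds ft (R + rN) : Int) := by
          rw [hneed']
          omega
        have hRle' : ((R + rN : Nat) : Int) ≤ (ERounds ft (R + rN) : Int) := by
          have h2 : (ERounds ft (R + rN) : Int) = (ERounds ft R : Int) + (rN : Int) * (m : Int) := by
            rw [hE]; push_cast; ring
          have h3 : (rN : Int) * 1 ≤ (rN : Int) * (m : Int) :=
            mul_le_mul_of_nonneg_left (by exact_mod_cast hm1) (by positivity)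
          push_cast
          omega
        -- the fuel disjunct for the recursive call
        have hmono : mAct ft (R + rN) ≤ m := mAct_mono ft (by omega)
        have hfuel2 : mAct ft R + 2 ≤ fuel + 1 := by
          rcases hfuel with ⟨_, h⟩ | h
          · exact absurd h hhit
          · exact h
        have hdisj : ((1 ≤ fuel ∧ k - (ERounds ft (R + rN) : Int) ≤ (mAct ft (R + rN) : Int))
            ∨ mAct ft (R + rN) + 2 ≤ fuel) := by
          rcases lt_or_eq_of_le hmono with hlt | heqm
          · right; omega
          · -- the active set did not shrink, so r cannot be one of the remaining times: r = cap
            have hrcapeq : r = cap := by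
              rcases hrmem with h | h
              · exact h
              · exfalso
                obtain ⟨t0, ht0, hcv0⟩ := List.mem_map.mp (by rw [hrd] at h; exact h)
                have hcvne : curV t0 R ≠ 0 := by omega
                have hp0 : predR R t0 = true := (curV_ne_iff t0 R).mp hcvne
                have ht0pos : ¬ t0 < 0 := by
                  intro hneg
                  have : curV t0 R = t0 - R := by unfold curV; simp [hneg]
                  omega
                have hR0 : (R : Int) < t0 := by
                  unfold predR at hp0
                  simp only [Bool.or_eq_true, decide_eq_true_eq] at hp0
                  tauto
                have hcv : curV t0 R = t0 - (R : Int) := by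
                  unfold curV; split_ifs <;> omega
                have ht0eq : t0 = (R : Int) + rN := by
                  rw [hcv] at hcv0
                  omega
                have hq0 : predR (R + rN) t0 = false := by
                  unfold predR
                  simp only [Bool.or_eq_false_iff, decide_eq_false_iff_not, not_lt]
                  push_cast
                  omega
                have := countP_lt_of_mem ft
                  (fun t ht hq => predR_mono R (R + rN) (by omega) t hq) t0 ht0 hp0 hq0
                have hlt2 : mAct ft (R + rN) < mAct ft R := this
                omega
            left
            refine ⟨by omega, ?_⟩
            rw [hneed', hrcapeq, heqm]
            omega
        have hrec := ih (R + rN) hRle' hneed1' hdisj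
        rw [hneed', ← hmc, hrN] at hrec
        exact hrec

-- ===== VERDICT (by name: the statement is the Claim_ definition above) =====
theorem solution_spec : Claim_equal_solution := by
  intro ft k _ hpre
  unfold Spec_solution
  obtain ⟨hne, hk1⟩ := hpre
  have hn : 0 < ft.length := List.length_pos_iff.mpr hne
  have h := loopB_eq ft k hne hk1 (ft.length + 2) 0 (by simp [ERounds_zero])
    (by rw [ERounds_zero]; push_cast; omega)
    (Or.inr (by have := mAct_le_len ft 0; omega))
  rw [mcur_zero, ERounds_zero] at h
  unfold solution_alt
  push_cast at h
  rw [show k - 0 = k from by ring] at h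
  exact h.symm
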